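-- pv_equiv track=rewrite | github.com/camelop/shears-paper-improver | scripts/synctex_parse.py | _collapse_ranges
-- ===== SOURCE A (Python) =====
-- def _collapse_ranges(sorted_lines: list[int], gap_tolerance: int) -> list[tuple[int, int]]:
--     """Collapse a sorted list of line numbers into (start, end) ranges.
--
--     Lines within gap_tolerance of each other are merged.
--     """
--     if not sorted_lines:
--         return []
--     ranges = []
--     start = sorted_lines[0]
--     end = sorted_lines[0]
--     for line in sorted_lines[1:]:
--         if line <= end + gap_tolerance:
--             end = line
--         else:
--             ranges.append((start, end))
--             start = line
--             end = line
--     ranges.append((start, end))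
--     return ranges
-- ===== SOURCE B (Python) =====
-- def _collapse_ranges(sorted_lines: list[int], gap_tolerance: int) -> list[tuple[int, int]]:
--     """Collapse a sorted list of line numbers into (start, end) ranges.
--
--     Boundary decomposition: zip adjacent pairs once, take the segment starts
--     (elements preceded by a gap) and segment ends (elements followed by a gap),
--     and zip them together.
--     """
--     if not sorted_lines:
--         return []
--     pairs = list(zip(sorted_lines, sorted_lines[1:]))
--     starts = [sorted_lines[0]] + [b for a, b in pairs if b > a + gap_tolerance]
--     ends = [a for a, b in pairs if b > a + gap_tolerance] + [sorted_lines[-1]]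
--     return list(zip(starts, ends))
-- ===== Notes on version B (the rewrite author's own statement) =====
-- stated objective: alternative
-- what changed: Replaces A's stateful accumulator loop (start/end/ranges mutated per element) by a boundary decomposition: zip adjacent pairs, filter the gap boundaries to get the segment-start and segment-end lists, and zip those together.
import Mathlib
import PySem

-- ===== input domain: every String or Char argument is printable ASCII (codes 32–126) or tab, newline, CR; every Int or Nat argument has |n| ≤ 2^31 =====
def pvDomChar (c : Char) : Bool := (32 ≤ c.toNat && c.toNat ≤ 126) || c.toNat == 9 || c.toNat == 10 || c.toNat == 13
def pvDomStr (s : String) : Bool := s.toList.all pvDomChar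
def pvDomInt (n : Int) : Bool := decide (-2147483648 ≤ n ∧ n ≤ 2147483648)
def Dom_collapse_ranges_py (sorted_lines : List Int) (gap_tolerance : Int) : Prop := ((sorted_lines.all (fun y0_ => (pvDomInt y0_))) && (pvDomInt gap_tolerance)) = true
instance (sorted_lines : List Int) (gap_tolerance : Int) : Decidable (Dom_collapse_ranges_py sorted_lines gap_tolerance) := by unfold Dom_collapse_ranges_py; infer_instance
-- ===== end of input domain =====

-- B replaces A's stateful accumulator loop by a boundary decomposition (zip adjacent
-- pairs, filter the gap boundaries into start/end lists, zip them); same O(n) cost.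


-- ===== PORT A =====
-- literal transliteration: fold over sorted_lines[1:] carrying (ranges, start, end)
def collapse_ranges_py (sorted_lines : List Int) (gap_tolerance : Int) : List (Int × Int) :=
  match sorted_lines with
  | [] => []
  | x :: rest =>
    let st := rest.foldl
      (fun (s : List (Int × Int) × Int × Int) line =>
        if line ≤ s.2.2 + gap_tolerance then (s.1, s.2.1, line)
        else (s.1 ++ [(s.2.1, s.2.2)], line, line))
      ([], x, x)
    st.1 ++ [(st.2.1, st.2.2)]

-- ===== PORT B =====
-- literal transliteration of Source B: pairs = zip(xs, xs[1:]); starts/ends by filtering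
-- the gap boundaries; result = zip(starts, ends). xs[-1] is getLastD (list nonempty here).
def collapse_ranges_py_alt (sorted_lines : List Int) (gap_tolerance : Int) : List (Int × Int) :=
  match sorted_lines with
  | [] => []
  | x :: _ =>
    let pairs := sorted_lines.zip (sorted_lines.drop 1)
    let starts := x :: (pairs.filter (fun p => p.2 > p.1 + gap_tolerance)).map Prod.snd
    let ends := (pairs.filter (fun p => p.2 > p.1 + gap_tolerance)).map Prod.fst
                  ++ [sorted_lines.getLastD 0]
    starts.zip ends

-- ===== PRECONDITION & SPEC =====
def Spec_collapse_ranges_py (sorted_lines : List Int) (gap_tolerance : Int) (out : List (Int × Int)) : Prop := out = collapse_ranges_py_alt sorted_lines gap_tolerance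
instance (sorted_lines : List Int) (gap_tolerance : Int) (out : List (Int × Int)) : Decidable (Spec_collapse_ranges_py sorted_lines gap_tolerance out) := by unfold Spec_collapse_ranges_py; infer_instance

-- ===== CLAIM (what is proved, stated in full; the proofs are below) =====
def Claim_equal_collapse_ranges_py : Prop := ∀ (sorted_lines : List Int) (gap_tolerance : Int), Dom_collapse_ranges_py sorted_lines gap_tolerance → Spec_collapse_ranges_py sorted_lines gap_tolerance (collapse_ranges_py sorted_lines gap_tolerance)

-- ===== LEMMAS AND PROOFS =====

-- common reference recursion: merge t into ranges, current segment (s, e)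
def mergeRec (g s e : Int) : List Int → List (Int × Int)
  | [] => [(s, e)]
  | l :: t => if l ≤ e + g then mergeRec g s l t else (s, e) :: mergeRec g l l t

lemma portA_eq_mergeRec (g : Int) (rest : List Int) :
    ∀ (acc : List (Int × Int)) (s e : Int),
      (let st := rest.foldl
        (fun (st : List (Int × Int) × Int × Int) line =>
          if line ≤ st.2.2 + g then (st.1, st.2.1, line)
          else (st.1 ++ [(st.2.1, st.2.2)], line, line))
        (acc, s, e)
       st.1 ++ [(st.2.1, st.2.2)]) = acc ++ mergeRec g s e rest := by
  induction rest with
  | nil => intro acc s e; simp [mergeRec]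
  | cons l t ih =>
    intro acc s e
    by_cases h : l ≤ e + g
    · simpa [List.foldl_cons, h, mergeRec] using ih acc s l
    · simp only [List.foldl_cons, if_neg h]
      rw [mergeRec, if_neg h]
      simpa using ih (acc ++ [(s, e)]) l l

lemma portB_eq_mergeRec (g : Int) (t : List Int) :
    ∀ (s e : Int),
      (s :: (((e :: t).zip t).filter (fun p => p.2 > p.1 + g)).map Prod.snd).zip
        ((((e :: t).zip t).filter (fun p => p.2 > p.1 + g)).map Prod.fst
          ++ [(e :: t).getLastD 0]) = mergeRec g s e t := by
  induction t with
  | nil => intro s e; simp [mergeRec]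
  | cons l t' ih =>
    intro s e
    by_cases h : l ≤ e + g
    · have hf : ¬ (l > e + g) := by omega
      have : (e :: l :: t').getLastD 0 = (l :: t').getLastD 0 := by
        simp
      simp only [List.zip_cons_cons, List.filter_cons, this]
      rw [mergeRec, if_pos h]
      simpa [hf] using ih s l
    · have hf : (l > e + g) := by omega
      simp only [List.zip_cons_cons, List.filter_cons]
      have : (e :: l :: t').getLastD 0 = (l :: t').getLastD 0 := by
        simp
      rw [mergeRec, if_neg h]
      simp only [this, hf, decide_true, if_true]
      simpa using ih l l

-- ===== VERDICT (by name: the statement is the Claim_ definition above) =====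
theorem collapse_ranges_py_spec : Claim_equal_collapse_ranges_py := by
  intro xs g _
  unfold Spec_collapse_ranges_py
  cases xs with
  | nil => rfl
  | cons x rest =>
    simp only [collapse_ranges_py, collapse_ranges_py_alt, List.drop_succ_cons,
      List.drop_zero]
    rw [portA_eq_mergeRec g rest [] x x]
    simpa using (portB_eq_mergeRec g rest x x).symm
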